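-- pv_equiv track=rewrite | github.com/johnap81/johnsstockapp | server.py | _t212_yahoo_ex_from_listing_symbol
-- ===== SOURCE A (Python) =====
-- def _t212_yahoo_ex_from_listing_symbol(ys: str) -> str:
--     u = (ys or "").strip().upper()
--     for suf, ex in (
--         (".DE", "XETRA"),
--         (".F", "FRA"),
--         (".L", "LSE"),
--         (".PA", "EPA"),
--         (".AS", "AMS"),
--         (".MI", "MIL"),
--         (".MC", "BME"),
--         (".SW", "SWX"),
--         (".ST", "STO"),
--         (".OL", "OSL"),
--         (".VI", "VIE"),
--         (".IR", "LSE"),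
--         (".BR", "BRU"),
--         (".WA", "WAR"),
--     ):
--         if u.endswith(suf):
--             return ex
--     if "." not in (ys or ""):
--         return "NASDAQ"
--     return "NASDAQ"
-- ===== SOURCE B (Python) =====
-- _T212_SUFFIX_EX = {
--     "DE": "XETRA", "F": "FRA", "L": "LSE", "PA": "EPA", "AS": "AMS",
--     "MI": "MIL", "MC": "BME", "SW": "SWX", "ST": "STO", "OL": "OSL",
--     "VI": "VIE", "IR": "LSE", "BR": "BRU", "WA": "WAR",
-- }
--
--
-- def _t212_yahoo_ex_from_listing_symbol(ys: str) -> str: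
--     u = (ys or "").strip().upper()
--     if "." not in u:
--         return "NASDAQ"
--     return _T212_SUFFIX_EX.get(u.rsplit(".", 1)[-1], "NASDAQ")
-- ===== Notes on version B (the rewrite author's own statement) =====
-- stated objective: idiomatic
-- what changed: Replaces A's ordered 14-way endswith scan with a module-level dict keyed by the bare suffix token: B extracts the segment after the last '.' once and does a single keyed lookup with 'NASDAQ' as default.
import Mathlib
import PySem

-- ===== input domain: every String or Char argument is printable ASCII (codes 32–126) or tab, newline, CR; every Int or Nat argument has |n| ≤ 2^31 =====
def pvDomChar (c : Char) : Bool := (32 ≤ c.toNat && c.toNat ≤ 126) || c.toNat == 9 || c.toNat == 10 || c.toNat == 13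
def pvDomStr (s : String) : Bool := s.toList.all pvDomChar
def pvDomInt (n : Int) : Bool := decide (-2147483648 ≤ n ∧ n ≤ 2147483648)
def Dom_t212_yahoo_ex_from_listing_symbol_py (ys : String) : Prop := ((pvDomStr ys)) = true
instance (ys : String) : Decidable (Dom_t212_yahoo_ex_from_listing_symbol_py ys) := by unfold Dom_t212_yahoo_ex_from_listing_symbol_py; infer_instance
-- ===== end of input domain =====

-- B replaces A's ordered endswith scan by extracting the token after the last '.' and one keyed dict lookup (idiomatic; same cost).

-- ===== PORT A =====
-- ('ys or ""' is 'ys' itself for every string, since the empty string is the only falsy str)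
def t212_yahoo_ex_from_listing_symbol_py (ys : String) : String :=
  let u := PySem.Str.upper (PySem.Str.strip ys)
  if PySem.Str.endswith u ".DE" then "XETRA"
  else if PySem.Str.endswith u ".F" then "FRA"
  else if PySem.Str.endswith u ".L" then "LSE"
  else if PySem.Str.endswith u ".PA" then "EPA"
  else if PySem.Str.endswith u ".AS" then "AMS"
  else if PySem.Str.endswith u ".MI" then "MIL"
  else if PySem.Str.endswith u ".MC" then "BME"
  else if PySem.Str.endswith u ".SW" then "SWX"
  else if PySem.Str.endswith u ".ST" then "STO"
  else if PySem.Str.endswith u ".OL" then "OSL"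
  else if PySem.Str.endswith u ".VI" then "VIE"
  else if PySem.Str.endswith u ".IR" then "LSE"
  else if PySem.Str.endswith u ".BR" then "BRU"
  else if PySem.Str.endswith u ".WA" then "WAR"
  else if ¬ PySem.Str.isIn "." ys then "NASDAQ"
  else "NASDAQ"

-- ===== PORT B =====
-- the module-level dict _T212_SUFFIX_EX; keys are the Python str keys viewed as List Char (the PySem.Chars view)
def t212SufEx : PySem.Dict (List Char) String := PySem.Dict.ofList
  [ (['D','E'], "XETRA"), (['F'], "FRA"), (['L'], "LSE"), (['P','A'], "EPA"), (['A','S'], "AMS"),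
    (['M','I'], "MIL"), (['M','C'], "BME"), (['S','W'], "SWX"), (['S','T'], "STO"), (['O','L'], "OSL"),
    (['V','I'], "VIE"), (['I','R'], "LSE"), (['B','R'], "BRU"), (['W','A'], "WAR") ]

def t212_yahoo_ex_from_listing_symbol_py_alt (ys : String) : String :=
  let u := PySem.Chars.upper (PySem.Chars.strip ys.toList)
  if PySem.Chars.isIn ['.'] u then
    -- u.rsplit(".", 1)[-1]: the segment of u after its LAST '.' (exact when '.' ∈ u)
    PySem.Dict.getD t212SufEx ((u.reverse.takeWhile (· ≠ '.')).reverse) "NASDAQ"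
  else "NASDAQ"

-- ===== PRECONDITION & SPEC =====
def Spec_t212_yahoo_ex_from_listing_symbol_py (ys : String) (out : String) : Prop := out = t212_yahoo_ex_from_listing_symbol_py_alt ys
instance (ys : String) (out : String) : Decidable (Spec_t212_yahoo_ex_from_listing_symbol_py ys out) := by unfold Spec_t212_yahoo_ex_from_listing_symbol_py; infer_instance

-- ===== CLAIM (what is proved, stated in full; the proofs are below) =====
def Claim_equal_t212_yahoo_ex_from_listing_symbol_py : Prop := ∀ (ys : String), Dom_t212_yahoo_ex_from_listing_symbol_py ys → Spec_t212_yahoo_ex_from_listing_symbol_py ys (t212_yahoo_ex_from_listing_symbol_py ys)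

-- ===== LEMMAS AND PROOFS =====

-- 'v ++ ['.'] is a prefix of r' ⟺ r contains a '.' and its dot-free head is exactly v
lemma prefix_dot (r : List Char) (v : List Char) (hv : '.' ∉ v) :
    (v ++ ['.'] <+: r) ↔ ('.' ∈ r ∧ r.takeWhile (· ≠ '.') = v) := by
  induction r generalizing v with
  | nil =>
      simp
  | cons c r' ih =>
      cases v with
      | nil =>
          by_cases hc : c = '.'
          · subst hc; simp [List.takeWhile]
          · simp [List.cons_prefix_cons, List.takeWhile, hc, Ne.symm hc]
      | cons d v' =>
          have hd : d ≠ '.' := fun h => hv (h ▸ List.mem_cons_self ..)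
          have hv' : '.' ∉ v' := fun h => hv (List.mem_cons_of_mem _ h)
          by_cases hc : c = d
          · subst hc
            simp [List.cons_prefix_cons, List.takeWhile, hd, ih v' hv']
            intro _ h
            exact absurd h.symm hd
          · constructor
            · intro h; exact absurd (List.cons_prefix_cons.mp h).1 (Ne.symm hc)
            · rintro ⟨_, htw⟩
              by_cases hcd : c = '.'
              · simp [List.takeWhile, hcd] at htw
              · simp [List.takeWhile, hcd] at htw
                exact absurd htw.1 hc

lemma endswith_dot (l w : List Char) (hw : '.' ∉ w) :
    PySem.Chars.endswith l ('.' :: w) = true ↔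
      ('.' ∈ l ∧ l.reverse.takeWhile (· ≠ '.') = w.reverse) := by
  rw [PySem.Chars.endswith_iff]
  have h1 : ('.' :: w) <:+ l ↔ ('.' :: w).reverse <+: l.reverse := List.reverse_prefix.symm
  rw [h1]
  simp only [List.reverse_cons]
  rw [prefix_dot _ _ (by simpa using hw)]
  simp

lemma beq_rev_eq (s w : List Char) : (w == s.reverse) = decide (s = w.reverse) := by
  by_cases h : s = w.reverse
  · subst h; simp
  · simp [h]
    intro hc
    exact h (by rw [hc, List.reverse_reverse])


lemma isIn_dot (l : List Char) : PySem.Chars.isIn ['.'] l = true ↔ '.' ∈ l := by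
  rw [PySem.Chars.isIn_iff_infix]
  constructor
  · intro h; exact h.mem (List.mem_singleton_self _)
  · intro h
    obtain ⟨a, b, rfl⟩ := List.mem_iff_append.mp h
    exact ⟨a, b, by simp⟩

set_option maxHeartbeats 1000000 in
lemma lookup_eq (t : List Char) :
    PySem.Dict.getD t212SufEx t.reverse "NASDAQ" =
    (if t = ['E','D'] then "XETRA"
     else if t = ['F'] then "FRA"
     else if t = ['L'] then "LSE"
     else if t = ['A','P'] then "EPA"
     else if t = ['S','A'] then "AMS"
     else if t = ['I','M'] then "MIL"
     else if t = ['C','M'] then "BME"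
     else if t = ['W','S'] then "SWX"
     else if t = ['T','S'] then "STO"
     else if t = ['L','O'] then "OSL"
     else if t = ['I','V'] then "VIE"
     else if t = ['R','I'] then "LSE"
     else if t = ['R','B'] then "BRU"
     else if t = ['A','W'] then "WAR"
     else "NASDAQ") := by
  have hmk : t212SufEx = PySem.Dict.mk
    [ (['D','E'], "XETRA"), (['F'], "FRA"), (['L'], "LSE"), (['P','A'], "EPA"), (['A','S'], "AMS"),
      (['M','I'], "MIL"), (['M','C'], "BME"), (['S','W'], "SWX"), (['S','T'], "STO"), (['O','L'], "OSL"),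
      (['V','I'], "VIE"), (['I','R'], "LSE"), (['B','R'], "BRU"), (['W','A'], "WAR") ] := by
    unfold t212SufEx
    decide
  rw [hmk, PySem.Dict.getD_eq_get?_getD]
  simp only [PySem.Dict.get?_mk_cons, beq_rev_eq, List.reverse_cons, List.reverse_nil,
    List.nil_append, List.cons_append, decide_eq_true_eq]
  simp only [apply_ite (fun o : Option String => o.getD "NASDAQ"), Option.getD_some]
  rfl

-- ===== VERDICT (by name: the statement is the Claim_ definition above) =====
theorem t212_yahoo_ex_from_listing_symbol_py_spec : Claim_equal_t212_yahoo_ex_from_listing_symbol_py := by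
  intro ys _
  unfold Spec_t212_yahoo_ex_from_listing_symbol_py
  unfold t212_yahoo_ex_from_listing_symbol_py t212_yahoo_ex_from_listing_symbol_py_alt
  simp only [PySem.Str.endswith_eq, PySem.Str.toList_upper, PySem.Str.toList_strip]
  set L := PySem.Chars.upper (PySem.Chars.strip ys.toList) with hL
  by_cases hdot : '.' ∈ L
  · rw [if_pos ((isIn_dot L).mpr hdot), lookup_eq]
    simp only [show (".DE" : String).toList = '.' :: ['D','E'] from rfl,
      show (".F" : String).toList = '.' :: ['F'] from rfl,
      show (".L" : String).toList = '.' :: ['L'] from rfl,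
      show (".PA" : String).toList = '.' :: ['P','A'] from rfl,
      show (".AS" : String).toList = '.' :: ['A','S'] from rfl,
      show (".MI" : String).toList = '.' :: ['M','I'] from rfl,
      show (".MC" : String).toList = '.' :: ['M','C'] from rfl,
      show (".SW" : String).toList = '.' :: ['S','W'] from rfl,
      show (".ST" : String).toList = '.' :: ['S','T'] from rfl,
      show (".OL" : String).toList = '.' :: ['O','L'] from rfl,
      show (".VI" : String).toList = '.' :: ['V','I'] from rfl,
      show (".IR" : String).toList = '.' :: ['I','R'] from rfl,
      show (".BR" : String).toList = '.' :: ['B','R'] from rfl,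
      show (".WA" : String).toList = '.' :: ['W','A'] from rfl,
      endswith_dot L ['D','E'] (by decide),
      endswith_dot L ['F'] (by decide),
      endswith_dot L ['L'] (by decide),
      endswith_dot L ['P','A'] (by decide),
      endswith_dot L ['A','S'] (by decide),
      endswith_dot L ['M','I'] (by decide),
      endswith_dot L ['M','C'] (by decide),
      endswith_dot L ['S','W'] (by decide),
      endswith_dot L ['S','T'] (by decide),
      endswith_dot L ['O','L'] (by decide),
      endswith_dot L ['V','I'] (by decide),
      endswith_dot L ['I','R'] (by decide),
      endswith_dot L ['B','R'] (by decide),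
      endswith_dot L ['W','A'] (by decide),
      hdot, true_and, List.reverse_cons, List.reverse_nil, List.nil_append,
      List.cons_append, ite_self]
  · rw [if_neg (fun h => hdot ((isIn_dot L).mp h))]
    have hfalse : ∀ w : List Char, '.' ∉ w →
        PySem.Chars.endswith L ('.' :: w) = false := by
      intro w hw
      rw [Bool.eq_false_iff]
      intro h
      exact hdot ((endswith_dot L w hw).mp h).1
    simp only [show (".DE" : String).toList = '.' :: ['D','E'] from rfl,
      show (".F" : String).toList = '.' :: ['F'] from rfl,
      show (".L" : String).toList = '.' :: ['L'] from rfl,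
      show (".PA" : String).toList = '.' :: ['P','A'] from rfl,
      show (".AS" : String).toList = '.' :: ['A','S'] from rfl,
      show (".MI" : String).toList = '.' :: ['M','I'] from rfl,
      show (".MC" : String).toList = '.' :: ['M','C'] from rfl,
      show (".SW" : String).toList = '.' :: ['S','W'] from rfl,
      show (".ST" : String).toList = '.' :: ['S','T'] from rfl,
      show (".OL" : String).toList = '.' :: ['O','L'] from rfl,
      show (".VI" : String).toList = '.' :: ['V','I'] from rfl,
      show (".IR" : String).toList = '.' :: ['I','R'] from rfl,
      show (".BR" : String).toList = '.' :: ['B','R'] from rfl,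
      show (".WA" : String).toList = '.' :: ['W','A'] from rfl]
    rw [hfalse _ (by decide), hfalse _ (by decide), hfalse _ (by decide), hfalse _ (by decide),
        hfalse _ (by decide), hfalse _ (by decide), hfalse _ (by decide), hfalse _ (by decide),
        hfalse _ (by decide), hfalse _ (by decide), hfalse _ (by decide), hfalse _ (by decide),
        hfalse _ (by decide), hfalse _ (by decide)]
    simp
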